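-- pv_equiv track=rewrite | github.com/NikHoh/VIAS | vias/utils/tools.py | fit_number_of_cp
-- ===== SOURCE A (Python) =====
-- def fit_number_of_cp(cp_vec, number_of_cp):
--     """Gets a vector of numbers and duplicates starting at index 1 the entries with increasing indexing until the length
--     of the vector equals number_of_cp."""
--     start = 0
--     increment = 2
--     while len(cp_vec) < number_of_cp:
--         if start >= len(cp_vec):
--             start = 0
--             increment += 1
--         cp_vec.insert(start, cp_vec[start])
--         start += increment
--     return cp_vec
-- ===== SOURCE B (Python) =====
-- def fit_number_of_cp(cp_vec, number_of_cp):
--     k = len(cp_vec)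
--     if number_of_cp <= k:
--         return cp_vec
--     q, r = divmod(number_of_cp - k, k)
--     out = []
--     for i, x in enumerate(cp_vec):
--         out.extend([x] * (q + 1 + (1 if i < r else 0)))
--     cp_vec[:] = out
--     return cp_vec
-- ===== Notes on version B (the rewrite author's own statement) =====
-- stated objective: alternative
-- what changed: A grows the list one element at a time with list.insert inside a while loop that cycles through passes; B computes each element's final copy count in closed form with one divmod and materialises the result in a single expansion pass.
-- outside the precondition, e.g. on fit_number_of_cp([], 5): A raises IndexError, B raises ZeroDivisionError
import Mathlib
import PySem

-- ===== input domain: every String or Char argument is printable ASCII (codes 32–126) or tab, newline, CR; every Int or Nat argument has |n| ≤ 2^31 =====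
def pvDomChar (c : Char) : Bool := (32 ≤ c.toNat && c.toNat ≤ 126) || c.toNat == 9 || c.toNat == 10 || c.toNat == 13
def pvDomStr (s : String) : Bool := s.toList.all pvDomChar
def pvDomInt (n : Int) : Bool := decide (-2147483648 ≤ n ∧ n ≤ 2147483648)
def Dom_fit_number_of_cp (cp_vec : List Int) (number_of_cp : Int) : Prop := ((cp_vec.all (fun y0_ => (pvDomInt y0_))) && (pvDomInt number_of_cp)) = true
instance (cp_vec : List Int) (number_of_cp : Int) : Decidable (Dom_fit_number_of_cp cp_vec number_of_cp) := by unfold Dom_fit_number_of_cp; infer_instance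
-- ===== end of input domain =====

-- B replaces A's one-insert-at-a-time growth loop by a divmod closed form for each element's
-- final copy count and a single expansion pass (objective: alternative algorithm, same measured cost).
-- Both A and B mutate cp_vec in place in Python; the equivalence proved here is about the return value.

-- ===== PORT A =====
-- literal transliteration of A's while loop; the `none` branch is Python's IndexError
-- (empty cp_vec that must grow), excluded by Pre_.
def fitLoopA (cp : List Int) (n start inc : Int) : List Int :=
  if (cp.length : Int) < n then
    -- start2/inc2 inline A's conditional reset of start and increment
    match PySem.List.pyGet? cp (if start ≥ (cp.length : Int) then 0 else start) with
    | none => cp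
    | some v =>
        fitLoopA (PySem.List.insert cp (if start ≥ (cp.length : Int) then 0 else start) v) n
          ((if start ≥ (cp.length : Int) then 0 else start)
            + (if start ≥ (cp.length : Int) then inc + 1 else inc))
          (if start ≥ (cp.length : Int) then inc + 1 else inc)
  else cp
termination_by (n - cp.length).toNat
decreasing_by
  simp only [PySem.List.length_insert]
  omega

def fit_number_of_cp (cp_vec : List Int) (number_of_cp : Int) : List Int :=
  fitLoopA cp_vec number_of_cp 0 2

-- ===== PORT B =====
-- transliteration of Source B; the `none` branch is Python's ZeroDivisionError (empty cp_vec),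
-- excluded by Pre_.
def fit_number_of_cp_alt (cp_vec : List Int) (number_of_cp : Int) : List Int :=
  let k : Int := cp_vec.length
  if number_of_cp ≤ k then cp_vec
  else
    match PySem.Int.divmod? (number_of_cp - k) k with
    | none => cp_vec
    | some (q, r) =>
      (PySem.List.enumerate cp_vec 0).foldl
        (fun out ix => out ++ List.replicate (q + 1 + (if ix.1 < r then 1 else 0)).toNat ix.2)
        []

-- ===== PRECONDITION & SPEC =====
-- Pre_ excludes only the crash case: an empty cp_vec that must grow, where A raises IndexError
-- (and B raises ZeroDivisionError).
def Pre_fit_number_of_cp (cp_vec : List Int) (number_of_cp : Int) : Prop :=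
  cp_vec ≠ [] ∨ number_of_cp ≤ (cp_vec.length : Int)

instance (cp_vec : List Int) (number_of_cp : Int) : Decidable (Pre_fit_number_of_cp cp_vec number_of_cp) := by
  unfold Pre_fit_number_of_cp; infer_instance

def pvWitness_fit_number_of_cp : List Int × Int := ([1, 2, 3], 8)

def Spec_fit_number_of_cp (cp_vec : List Int) (number_of_cp : Int) (out : List Int) : Prop := out = fit_number_of_cp_alt cp_vec number_of_cp
instance (cp_vec : List Int) (number_of_cp : Int) (out : List Int) : Decidable (Spec_fit_number_of_cp cp_vec number_of_cp out) := by unfold Spec_fit_number_of_cp; infer_instance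

-- ===== CLAIM (what is proved, stated in full; the proofs are below) =====
def Claim_equal_fit_number_of_cp : Prop := ∀ (cp_vec : List Int) (number_of_cp : Int), Dom_fit_number_of_cp cp_vec number_of_cp → Pre_fit_number_of_cp cp_vec number_of_cp → Spec_fit_number_of_cp cp_vec number_of_cp (fit_number_of_cp cp_vec number_of_cp)

-- ===== LEMMAS AND PROOFS =====

-- `expand xs r m`: each of the first r elements of xs repeated m+1 times, the rest m times.
def expand (xs : List Int) (r m : Nat) : List Int :=
  match xs, r with
  | [], _ => []
  | x :: t, 0 => List.replicate m x ++ expand t 0 m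
  | x :: t, r + 1 => List.replicate (m + 1) x ++ expand t r m

theorem expand_length (xs : List Int) (r m : Nat) (h : r ≤ xs.length) :
    (expand xs r m).length = m * xs.length + r := by
  induction xs generalizing r with
  | nil =>
    simp only [List.length_nil, Nat.le_zero] at h
    simp [expand, h]
  | cons x t ih =>
    cases r with
    | zero =>
      simp only [expand, List.length_append, List.length_replicate, List.length_cons]
      rw [ih 0 (Nat.zero_le _)]
      ring
    | succ r =>
      simp only [expand, List.length_append, List.length_replicate, List.length_cons]
      rw [ih r (by simpa using h)]
      ring

theorem expand_zero_one (xs : List Int) : expand xs 0 1 = xs := by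
  induction xs with
  | nil => rfl
  | cons x t ih => simp [expand, ih]

theorem expand_full (xs : List Int) (m : Nat) : expand xs xs.length m = expand xs 0 (m + 1) := by
  induction xs with
  | nil => rfl
  | cons x t ih => simp [expand, ih, List.replicate_succ]

theorem expand_get (xs : List Int) (j m : Nat) (hj : j < xs.length) (hm : 1 ≤ m) :
    (expand xs j m)[(m + 1) * j]? = xs[j]? := by
  induction j generalizing xs with
  | zero =>
    cases xs with
    | nil => simp at hj
    | cons x t =>
      simp only [expand, Nat.mul_zero]
      rw [List.getElem?_append_left (by simpa using hm)]
      simp [List.getElem?_replicate]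
      omega
  | succ j ih =>
    cases xs with
    | nil => simp at hj
    | cons x t =>
      have hl : (m + 1) * (j + 1) = (List.replicate (m + 1) x).length + (m + 1) * j := by
        simp; ring
      simp only [expand, hl]
      rw [List.getElem?_append_right (Nat.le_add_right _ _)]
      simp only [Nat.add_sub_cancel_left]
      rw [ih t (by simpa using hj)]
      simp

theorem expand_insert (xs : List Int) (j m : Nat) (v : Int) (hj : j < xs.length)
    (hv : xs[j]? = some v) :
    (expand xs j m).take ((m + 1) * j) ++ v :: (expand xs j m).drop ((m + 1) * j)
      = expand xs (j + 1) m := by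
  induction j generalizing xs with
  | zero =>
    cases xs with
    | nil => simp at hj
    | cons x t =>
      simp only [List.getElem?_cons_zero, Option.some.injEq] at hv
      simp [expand, hv, List.replicate_succ]
  | succ j ih =>
    cases xs with
    | nil => simp at hj
    | cons x t =>
      have hl : (m + 1) * (j + 1) = (m + 1) + (m + 1) * j := by ring
      simp only [expand, hl]
      rw [List.take_append, List.drop_append]
      simp only [List.length_replicate]
      have h1 : (m + 1) + (m + 1) * j - (m + 1) = (m + 1) * j := by omega
      rw [List.take_of_length_le (by simp), List.drop_of_length_le (by simp)]
      simp only [h1, List.nil_append]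
      rw [List.append_assoc]
      congr 1
      exact ih t (by simpa using hj) (by simpa using hv)

-- main invariant for A's loop: from a mid-pass state (pass increment m+1, j elements of the
-- pass done) it reaches the closed form.
theorem loopA_closed (d : Nat) : ∀ (xs : List Int) (m j : Nat) (n : Int),
    xs ≠ [] → 1 ≤ m → j ≤ xs.length →
    ((m * xs.length + j : Nat) : Int) ≤ n →
    d = (n - ((m * xs.length + j : Nat) : Int)).toNat →
    fitLoopA (expand xs j m) n (((m + 1) * j : Nat) : Int) (((m + 1) : Nat) : Int)
      = expand xs (n.toNat % xs.length) (n.toNat / xs.length) := by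
  induction d with
  | zero =>
    intro xs m j n hne hm hj hlen hd
    have hk : 0 < xs.length := List.length_pos_iff.mpr hne
    have hnn : n.toNat = m * xs.length + j := by omega
    rw [fitLoopA, if_neg (by rw [expand_length xs j m hj]; omega)]
    rcases Nat.lt_or_ge j xs.length with hjlt | hjge
    · have e1 : n.toNat % xs.length = j := by
        rw [hnn, Nat.add_comm, Nat.add_mul_mod_self_right, Nat.mod_eq_of_lt hjlt]
      have e2 : n.toNat / xs.length = m := by
        rw [hnn, Nat.add_comm, Nat.add_mul_div_right _ _ hk, Nat.div_eq_of_lt hjlt, Nat.zero_add]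
      rw [e1, e2]
    · have hjk : j = xs.length := le_antisymm hj hjge
      subst hjk
      have e0 : n.toNat = (m + 1) * xs.length := by rw [hnn]; ring
      have e1 : n.toNat % xs.length = 0 := by rw [e0, Nat.mul_mod_left]
      have e2 : n.toNat / xs.length = m + 1 := by rw [e0, Nat.mul_div_cancel _ hk]
      rw [e1, e2, expand_full]
  | succ d ih =>
    intro xs m j n hne hm hj hlen hd
    have hk : 0 < xs.length := List.length_pos_iff.mpr hne
    have hlt : ((m * xs.length + j : Nat) : Int) < n := by omega
    rw [fitLoopA, if_pos (by rw [expand_length xs j m hj]; omega)]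
    rcases Nat.lt_or_ge j xs.length with hjlt | hjge
    · -- mid pass: no reset
      have hmul : m * (j + 1) ≤ m * xs.length := Nat.mul_le_mul_left m hjlt
      have hnostart : ¬ ((((m + 1) * j : Nat) : Int) ≥ ((expand xs j m).length : Int)) := by
        rw [expand_length xs j m hj]
        push_cast
        push_cast at hmul ⊢
        nlinarith [hmul]
      rw [if_neg hnostart, if_neg hnostart]
      have hvget : xs[j]? = some (xs[j]'hjlt) := List.getElem?_eq_getElem hjlt
      have hget : PySem.List.pyGet? (expand xs j m) (((m + 1) * j : Nat) : Int)
          = some (xs[j]'hjlt) := by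
        rw [PySem.List.pyGet?_natCast, expand_get xs j m hjlt hm, hvget]
      rw [hget]
      simp only []
      have hle : (m + 1) * j ≤ (expand xs j m).length := by
        rw [expand_length xs j m hj]; nlinarith [hmul]
      rw [PySem.List.insert_natCast _ _ _ hle,
        expand_insert xs j m _ hjlt hvget]
      have hst : (((m + 1) * j : Nat) : Int) + ((m + 1 : Nat) : Int)
          = (((m + 1) * (j + 1) : Nat) : Int) := by push_cast; ring
      rw [hst]
      have hsucc : m * xs.length + (j + 1) = (m * xs.length + j) + 1 := by ring
      exact ih xs m (j + 1) n hne hm hjlt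
        (by rw [hsucc]; push_cast; push_cast at hlt; omega)
        (by rw [hsucc]; push_cast; push_cast at hd ⊢; omega)
  -- end of pass: reset to start 0 with increment m+2
    · have hjk : j = xs.length := le_antisymm hj hjge
      subst hjk
      have hstart : (((m + 1) * xs.length : Nat) : Int) ≥ ((expand xs xs.length m).length : Int) := by
        rw [expand_length xs xs.length m (le_refl _)]
        push_cast; ring_nf; omega
      rw [if_pos hstart, if_pos hstart]
      have hvget : xs[0]? = some (xs[0]'hk) := List.getElem?_eq_getElem hk
      have hget : PySem.List.pyGet? (expand xs xs.length m) (0 : Int) = some (xs[0]'hk) := by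
        have h0 : (0 : Int) = ((0 : Nat) : Int) := rfl
        rw [expand_full, h0, PySem.List.pyGet?_natCast]
        have := expand_get xs 0 (m + 1) hk (by omega)
        simpa using this ▸ hvget
      rw [hget]
      simp only []
      rw [PySem.List.insert_zero]
      have hrepl : (xs[0]'hk) :: expand xs 0 (m + 1) = expand xs 1 (m + 1) := by
        have := expand_insert xs 0 (m + 1) (xs[0]'hk) hk hvget
        simpa using this
      rw [expand_full, hrepl]
      have hst : (0 : Int) + (((m + 1 : Nat) : Int) + 1) = (((m + 1 + 1) * 1 : Nat) : Int) := by
        push_cast; ring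
      have hinc : ((m + 1 : Nat) : Int) + 1 = ((m + 1 + 1 : Nat) : Int) := by push_cast; ring
      rw [hst, hinc]
      have hsucc : (m + 1) * xs.length + 1 = (m * xs.length + xs.length) + 1 := by ring
      exact ih xs (m + 1) 1 n hne (by omega) hk
        (by rw [hsucc]; push_cast; push_cast at hlt; omega)
        (by rw [hsucc]; push_cast; push_cast at hd ⊢; omega)

-- B's fold over enumerate builds exactly `expand`
theorem altFold (qn rn : Nat) (xs : List Int) : ∀ (s : Nat) (acc : List Int),
    (PySem.List.enumerate xs ((s : Nat) : Int)).foldl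
      (fun out ix => out ++
        List.replicate (((qn : Nat) : Int) + 1 + (if ix.1 < ((rn : Nat) : Int) then 1 else 0)).toNat ix.2)
      acc
    = acc ++ expand xs (rn - s) (qn + 1) := by
  induction xs with
  | nil => intro s acc; simp [PySem.List.enumerate_nil, expand]
  | cons x t ih =>
    intro s acc
    rw [PySem.List.enumerate_cons, List.foldl_cons]
    have hs1 : ((s : Nat) : Int) + 1 = ((s + 1 : Nat) : Int) := by push_cast; ring
    rw [hs1, ih (s + 1)]
    rcases Nat.lt_or_ge s rn with hsr | hsr
    · have hif : (if ((s : Nat) : Int) < ((rn : Nat) : Int) then (1:Int) else 0) = 1 := by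
        rw [if_pos (by exact_mod_cast hsr)]
      have hcnt : (((qn : Nat) : Int) + 1 + 1).toNat = qn + 1 + 1 := by omega
      have hrs : rn - s = (rn - (s + 1)) + 1 := by omega
      rw [hif, hcnt, hrs]
      simp only [expand, List.append_assoc]
    · have hif : (if ((s : Nat) : Int) < ((rn : Nat) : Int) then (1:Int) else 0) = 0 := by
        rw [if_neg (by exact_mod_cast Nat.not_lt.mpr hsr)]
      have hcnt : (((qn : Nat) : Int) + 1 + 0).toNat = qn + 1 := by omega
      have hrs : rn - (s + 1) = 0 := by omega
      have hrs0 : rn - s = 0 := by omega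
      rw [hif, hcnt, hrs, hrs0]
      simp only [expand, List.append_assoc]

theorem alt_closed (xs : List Int) (n : Int) (hne : xs ≠ [])
    (hlt : (xs.length : Int) < n) :
    fit_number_of_cp_alt xs n = expand xs (n.toNat % xs.length) (n.toNat / xs.length) := by
  have hk : 0 < xs.length := List.length_pos_iff.mpr hne
  have hkn : xs.length ≤ n.toNat := by omega
  unfold fit_number_of_cp_alt
  rw [if_neg (by omega)]
  have hsub : n - (xs.length : Int) = ((n.toNat - xs.length : Nat) : Int) := by omega
  have hdm : PySem.Int.divmod? (n - (xs.length : Int)) (xs.length : Int)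
      = some ((((n.toNat - xs.length) / xs.length : Nat) : Int),
              (((n.toNat - xs.length) % xs.length : Nat) : Int)) := by
    rw [hsub]
    simp only [PySem.Int.divmod?]
    rw [if_neg (by exact_mod_cast Nat.pos_iff_ne_zero.mp hk)]
    have h1 := PySem.Int.floordiv_natCast (n.toNat - xs.length) xs.length
    have h2 := PySem.Int.mod_natCast (n.toNat - xs.length) xs.length
    simp only [PySem.Int.floordiv] at h1
    simp only [PySem.Int.mod] at h2
    rw [h1, h2]
  rw [hdm]
  simp only []
  have hF := altFold ((n.toNat - xs.length) / xs.length) ((n.toNat - xs.length) % xs.length) xs 0 []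
  simp only [Nat.cast_zero, Nat.sub_zero, List.nil_append] at hF
  rw [hF]
  have e0 : n.toNat - xs.length + xs.length = n.toNat := Nat.sub_add_cancel hkn
  have e1 : (n.toNat - xs.length) % xs.length = n.toNat % xs.length := by
    conv_rhs => rw [← e0]
    rw [Nat.add_mod_right]
  have e2 : (n.toNat - xs.length) / xs.length + 1 = n.toNat / xs.length := by
    conv_rhs => rw [← e0]
    rw [Nat.add_div_right _ hk]
  rw [e1, e2]

-- ===== VERDICT (by name: the statement is the Claim_ definition above) =====
theorem fit_number_of_cp_spec : Claim_equal_fit_number_of_cp := by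
  intro cp_vec number_of_cp _hdom hpre
  unfold Spec_fit_number_of_cp fit_number_of_cp
  by_cases hle : number_of_cp ≤ (cp_vec.length : Int)
  · rw [fitLoopA, if_neg (by omega)]
    unfold fit_number_of_cp_alt
    rw [if_pos hle]
  · have hlt : (cp_vec.length : Int) < number_of_cp := by omega
    have hne : cp_vec ≠ [] := by
      rcases hpre with h | h
      · exact h
      · omega
    have h2 : (2 : Int) = ((1 + 1 : Nat) : Int) := rfl
    have h0 : (0 : Int) = (((1 + 1) * 0 : Nat) : Int) := rfl
    rw [h0, h2]
    conv_lhs => rw [← expand_zero_one cp_vec]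
    rw [loopA_closed ((number_of_cp - (cp_vec.length : Int)).toNat) cp_vec 1 0
      number_of_cp hne (le_refl 1) (Nat.zero_le _) (by push_cast; omega) (by push_cast; omega)]
    exact (alt_closed cp_vec number_of_cp hne hlt).symm
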